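-- pv_equiv track=rewrite | github.com/pigmeetsomebody/autoMSS | crawler/qianxin_crawler.py | generate_knowledge_texts
-- ===== SOURCE A (Python) =====
-- from typing import List, Dict, Any, Optional
--
-- def generate_knowledge_texts(vulnerabilities: List[Dict]) -> List[str]:
--     """生成知识库文本"""
--     texts = []
--
--     for vuln in vulnerabilities:
--         # 生成漏洞知识文本
--         text_parts = []
--
--         if vuln.get('title'):
--             text_parts.append(f"漏洞标题: {vuln['title']}")
--
--         if vuln.get('id'):
--             text_parts.append(f"漏洞编号: {vuln['id']}")
--
--         if vuln.get('cve_id'):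
--             text_parts.append(f"CVE编号: {vuln['cve_id']}")
--
--         if vuln.get('severity'):
--             text_parts.append(f"危险等级: {vuln['severity']}")
--
--         if vuln.get('cvss_score'):
--             text_parts.append(f"CVSS评分: {vuln['cvss_score']}")
--
--         if vuln.get('vendor'):
--             text_parts.append(f"厂商: {vuln['vendor']}")
--
--         if vuln.get('product'):
--             text_parts.append(f"产品: {vuln['product']}")
--
--         if vuln.get('version'):
--             text_parts.append(f"受影响版本: {vuln['version']}")
--
--         if vuln.get('description'):
--             text_parts.append(f"漏洞描述: {vuln['description']}")
--
--         if vuln.get('solution'):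
--             text_parts.append(f"解决方案: {vuln['solution']}")
--
--         if vuln.get('date_published'):
--             text_parts.append(f"发布时间: {vuln['date_published']}")
--
--         if text_parts:
--             knowledge_text = '\n'.join(text_parts)
--             texts.append(knowledge_text)
--
--     return texts
-- ===== SOURCE B (Python) =====
-- _SLOT = {
--     'title': (0, '漏洞标题'),
--     'id': (1, '漏洞编号'),
--     'cve_id': (2, 'CVE编号'),
--     'severity': (3, '危险等级'),
--     'cvss_score': (4, 'CVSS评分'),
--     'vendor': (5, '厂商'),
--     'product': (6, '产品'),
--     'version': (7, '受影响版本'),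
--     'description': (8, '漏洞描述'),
--     'solution': (9, '解决方案'),
--     'date_published': (10, '发布时间'),
-- }
--
--
-- def generate_knowledge_texts(vulnerabilities):
--     """生成知识库文本: one pass over each record's own items into rank-indexed slots."""
--     texts = []
--     for vuln in vulnerabilities:
--         slots = [None] * 11
--         for key, value in vuln.items():
--             info = _SLOT.get(key)
--             if info and value:
--                 rank, label = info
--                 slots[rank] = f'{label}: {value}'
--         parts = [p for p in slots if p is not None]
--         if parts:
--             texts.append('\n'.join(parts))
--     return texts
-- ===== Notes on version B (the rewrite author's own statement) =====
-- stated objective: alternative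
-- what changed: Instead of probing the record for each of the 11 schema keys in turn, B makes a single pass over the record's own items, direct-indexing each recognised field into a fixed 11-slot bucket array via a key->(rank,label) table, then reads the non-empty slots out in rank order; the work is driven by the record's entries, not by the schema.
import Mathlib
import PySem

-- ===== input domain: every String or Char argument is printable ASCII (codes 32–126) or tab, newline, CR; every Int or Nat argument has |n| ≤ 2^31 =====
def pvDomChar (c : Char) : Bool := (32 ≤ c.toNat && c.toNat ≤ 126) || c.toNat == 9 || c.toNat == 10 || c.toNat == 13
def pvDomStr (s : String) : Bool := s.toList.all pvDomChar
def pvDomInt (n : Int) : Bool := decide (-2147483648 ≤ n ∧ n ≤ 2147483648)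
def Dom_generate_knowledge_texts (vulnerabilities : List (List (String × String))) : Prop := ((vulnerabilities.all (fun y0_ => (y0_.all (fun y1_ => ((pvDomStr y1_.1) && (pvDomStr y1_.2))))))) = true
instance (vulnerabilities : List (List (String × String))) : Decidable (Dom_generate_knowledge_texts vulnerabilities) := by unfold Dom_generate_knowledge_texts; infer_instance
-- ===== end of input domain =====

-- B replaces A's 11 sequential key probes by a single pass over each record's own
-- items, direct-indexing recognised fields into a fixed 11-slot bucket array via a
-- key -> (rank, label) table and reading the slots out in rank order (alternative).

-- dict lookup (first match; "" for a missing key = falsy `.get`), shared by both ports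
def pvLookup (d : List (String × String)) (k : String) : String :=
  match d.find? (fun p => p.1 == k) with
  | some p => p.2
  | none => ""

-- ===== PORT A =====
-- the eleven sequential `if vuln.get(k): text_parts.append(f"...: {vuln[k]}")` steps
def aParts (vuln : List (String × String)) : List String :=
  let parts : List String := []
  let parts := if pvLookup vuln "title" ≠ "" then parts ++ ["漏洞标题: " ++ pvLookup vuln "title"] else parts
  let parts := if pvLookup vuln "id" ≠ "" then parts ++ ["漏洞编号: " ++ pvLookup vuln "id"] else parts
  let parts := if pvLookup vuln "cve_id" ≠ "" then parts ++ ["CVE编号: " ++ pvLookup vuln "cve_id"] else parts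
  let parts := if pvLookup vuln "severity" ≠ "" then parts ++ ["危险等级: " ++ pvLookup vuln "severity"] else parts
  let parts := if pvLookup vuln "cvss_score" ≠ "" then parts ++ ["CVSS评分: " ++ pvLookup vuln "cvss_score"] else parts
  let parts := if pvLookup vuln "vendor" ≠ "" then parts ++ ["厂商: " ++ pvLookup vuln "vendor"] else parts
  let parts := if pvLookup vuln "product" ≠ "" then parts ++ ["产品: " ++ pvLookup vuln "product"] else parts
  let parts := if pvLookup vuln "version" ≠ "" then parts ++ ["受影响版本: " ++ pvLookup vuln "version"] else parts
  let parts := if pvLookup vuln "description" ≠ "" then parts ++ ["漏洞描述: " ++ pvLookup vuln "description"] else parts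
  let parts := if pvLookup vuln "solution" ≠ "" then parts ++ ["解决方案: " ++ pvLookup vuln "solution"] else parts
  let parts := if pvLookup vuln "date_published" ≠ "" then parts ++ ["发布时间: " ++ pvLookup vuln "date_published"] else parts
  parts

def generate_knowledge_texts (vulnerabilities : List (List (String × String))) : List String :=
  vulnerabilities.foldl
    (fun texts vuln =>
      let text_parts := aParts vuln
      if ¬ text_parts.isEmpty then texts ++ [PySem.Str.join "\n" text_parts] else texts)
    []

-- ===== PORT B =====
-- the _SLOT table: key -> (rank, label)
def bTable : List (String × Nat × String) :=
  [("title", 0, "漏洞标题"), ("id", 1, "漏洞编号"), ("cve_id", 2, "CVE编号"),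
   ("severity", 3, "危险等级"), ("cvss_score", 4, "CVSS评分"), ("vendor", 5, "厂商"),
   ("product", 6, "产品"), ("version", 7, "受影响版本"), ("description", 8, "漏洞描述"),
   ("solution", 9, "解决方案"), ("date_published", 10, "发布时间")]

-- `_SLOT.get(key)`
def slotOf (k : String) : Option (Nat × String) :=
  (bTable.find? (fun e => e.1 == k)).map (fun e => e.2)

-- `if info and value: slots[rank] = f'{label}: {value}'` for one item
def fillStep (slots : List (Option String)) (kv : String × String) : List (Option String) :=
  match slotOf kv.1 with
  | some (r, l) => if kv.2 ≠ "" then slots.set r (some (l ++ ": " ++ kv.2)) else slots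
  | none => slots

-- `slots = [None]*11; for key, value in vuln.items(): …`
def fillSlots (vuln : List (String × String)) : List (Option String) :=
  vuln.foldl fillStep (List.replicate 11 none)

def generate_knowledge_texts_alt (vulnerabilities : List (List (String × String))) : List String :=
  vulnerabilities.foldl
    (fun texts vuln =>
      let parts := (fillSlots vuln).filterMap id
      if ¬ parts.isEmpty then texts ++ [PySem.Str.join "\n" parts] else texts)
    []

-- ===== PRECONDITION & SPEC =====
-- Pre_ excludes association lists with duplicate keys inside one record: a Python
-- dict cannot contain them (every input the Python A accepts satisfies Pre_), and on
-- such lists A's first-match lookup and B's last-write slot order are both accidental.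
def Pre_generate_knowledge_texts (vulnerabilities : List (List (String × String))) : Prop :=
  ∀ v ∈ vulnerabilities, (v.map Prod.fst).Nodup
instance (vulnerabilities : List (List (String × String))) : Decidable (Pre_generate_knowledge_texts vulnerabilities) := by unfold Pre_generate_knowledge_texts; infer_instance

def pvWitness_generate_knowledge_texts : (List (List (String × String))) :=
  [[("title", "SQL injection"), ("severity", "high"), ("cvss_score", "")], []]

def Spec_generate_knowledge_texts (vulnerabilities : List (List (String × String))) (out : List String) : Prop := out = generate_knowledge_texts_alt vulnerabilities
instance (vulnerabilities : List (List (String × String))) (out : List String) : Decidable (Spec_generate_knowledge_texts vulnerabilities out) := by unfold Spec_generate_knowledge_texts; infer_instance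

-- ===== CLAIM (what is proved, stated in full; the proofs are below) =====
def Claim_equal_generate_knowledge_texts : Prop := ∀ (vulnerabilities : List (List (String × String))), Dom_generate_knowledge_texts vulnerabilities → Pre_generate_knowledge_texts vulnerabilities → Spec_generate_knowledge_texts vulnerabilities (generate_knowledge_texts vulnerabilities)

-- ===== LEMMAS AND PROOFS =====

-- boolean "this item writes slot i"
def slotHits (i : Nat) (kv : String × String) : Bool :=
  ((slotOf kv.1).map Prod.fst == some i) && (kv.2 != "")

-- slotOf is read off the literal table: a hit at rank r pins down the table row
theorem slotOf_some {k : String} {r : Nat} {l : String} (h : slotOf k = some (r, l)) :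
    bTable[r]? = some (k, r, l) := by
  unfold slotOf bTable at h
  simp only [List.find?] at h
  repeat' split at h
  all_goals simp only [Option.map_some, Option.map_none, Option.some.injEq, Prod.mk.injEq,
    reduceCtorEq] at h
  all_goals obtain ⟨hr, hl⟩ := h
  all_goals subst hr; subst hl; simp_all [bTable]

theorem fillStep_length (slots : List (Option String)) (kv : String × String) :
    (fillStep slots kv).length = slots.length := by
  unfold fillStep
  split <;> (try split) <;> simp

theorem foldl_fillStep_length (items : List (String × String)) (s : List (Option String)) :
    (items.foldl fillStep s).length = s.length := by
  induction items generalizing s with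
  | nil => rfl
  | cons kv rest ih => rw [List.foldl_cons, ih, fillStep_length]

-- final content of slot i: the label of row i with the value of the (unique) item hitting i
theorem foldl_fillStep_get (items : List (String × String)) (s : List (Option String))
    (i : Nat) (hs : s.length = 11) (hi : i < 11)
    (hnd : (items.map Prod.fst).Nodup) :
    (items.foldl fillStep s)[i]? =
      match items.find? (slotHits i) with
      | some kv => some (some ((bTable[i]!).2.2 ++ ": " ++ kv.2))
      | none => s[i]? := by
  induction items generalizing s with
  | nil => simp
  | cons kv rest ih =>
    simp only [List.map_cons, List.nodup_cons] at hnd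
    rw [List.foldl_cons, List.find?_cons]
    rcases hso : slotOf kv.1 with _ | ⟨r, l⟩
    · have hcond : slotHits i kv = false := by simp [slotHits, hso]
      rw [hcond]
      have hstep : fillStep s kv = s := by unfold fillStep; rw [hso]
      rw [hstep, ih s hs hnd.2]
    · by_cases hv : kv.2 = ""
      · have hcond : slotHits i kv = false := by simp [slotHits, hv]
        rw [hcond]
        have hstep : fillStep s kv = s := by unfold fillStep; rw [hso]; simp [hv]
        rw [hstep, ih s hs hnd.2]
      · have hstep : fillStep s kv = s.set r (some (l ++ ": " ++ kv.2)) := by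
          unfold fillStep; rw [hso]; simp [hv]
        have hrow := slotOf_some hso
        by_cases hri : r = i
        · subst hri
          have hcond : slotHits r kv = true := by simp [slotHits, hso, hv]
          rw [hcond]
          have hlbl : (bTable[r]!).2.2 = l := by
            simp [hrow]
          have hnone : rest.find? (slotHits r) = none := by
            apply List.find?_eq_none.mpr
            intro kv' hmem hhit
            rcases hso' : slotOf kv'.1 with _ | ⟨r', l'⟩
            · simp [slotHits, hso'] at hhit
            · have : r' = r := by simp [slotHits, hso'] at hhit; exact hhit.1
              subst this
              have hrow' := slotOf_some hso'
              rw [hrow] at hrow'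
              have hk : kv'.1 = kv.1 := by
                simp only [Option.some.injEq, Prod.mk.injEq] at hrow'
                exact hrow'.1.symm
              exact hnd.1 (hk ▸ List.mem_map_of_mem hmem)
          rw [hstep, ih _ (by simp [hs]) hnd.2, hnone, hlbl]
          have hrlt : r < s.length := hs ▸ hi
          simp [hrlt]
        · have hcond : slotHits i kv = false := by simp [slotHits, hso, hri]
          rw [hcond]
          rw [hstep, ih _ (by simp [hs]) hnd.2]
          have : (s.set r (some (l ++ ": " ++ kv.2)))[i]? = s[i]? :=
            List.getElem?_set_ne (by omega)
          rw [this]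

-- a table row determines slotOf on its key (table keys are distinct)
theorem slotOf_row {i : Nat} {K : String} {R : Nat} {L : String}
    (hrow : bTable[i]? = some (K, R, L)) : slotOf K = some (R, L) := by
  have hi : i < 11 := by
    by_contra h
    rw [List.getElem?_eq_none (by simp [bTable]; omega)] at hrow
    cases hrow
  interval_cases i <;>
    (simp [bTable] at hrow; obtain ⟨h1, h2, h3⟩ := hrow; subst h1; subst h2; subst h3; decide)

-- on row i the hit predicate is just "key = row key and value truthy"
theorem slotHits_pred {i : Nat} {K : String} {L : String}
    (hrow : bTable[i]? = some (K, i, L)) (kv : String × String) :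
    slotHits i kv = ((kv.1 == K) && (kv.2 != "")) := by
  unfold slotHits
  rcases hso : slotOf kv.1 with _ | ⟨r, l⟩
  · simp only [Option.map_none]
    by_cases hk : kv.1 = K
    · rw [hk, slotOf_row hrow] at hso; cases hso
    · simp [hk]
  · simp only [Option.map_some]
    by_cases hk : kv.1 = K
    · rw [hk, slotOf_row hrow] at hso
      simp only [Option.some.injEq, Prod.mk.injEq] at hso
      simp [hso.1, hk]
    · have hri : r ≠ i := by
        intro hri; subst hri
        have := slotOf_some hso
        rw [hrow] at this
        simp only [Option.some.injEq, Prod.mk.injEq] at this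
        exact hk this.1.symm
      have h1 : (some r == some i) = false := by simp [hri]
      have h2 : (kv.1 == K) = false := by simp [hk]
      rw [h1, h2]


-- first truthy match for a fixed key, under nodup keys, is the first-match lookup
theorem find_truthy (items : List (String × String)) (K : String)
    (hnd : (items.map Prod.fst).Nodup) :
    items.find? (fun kv => (kv.1 == K) && (kv.2 != "")) =
      if pvLookup items K ≠ "" then some (K, pvLookup items K) else none := by
  induction items with
  | nil => simp [pvLookup]
  | cons kv rest ih =>
    simp only [List.map_cons, List.nodup_cons] at hnd
    rw [List.find?_cons]
    by_cases hk : kv.1 = K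
    · have hpv : pvLookup (kv :: rest) K = kv.2 := by simp [pvLookup, hk]
      by_cases hv : kv.2 = ""
      · have : ((kv.1 == K) && (kv.2 != "")) = false := by simp [hv]
        rw [this]
        have hnone : rest.find? (fun kv => (kv.1 == K) && (kv.2 != "")) = none := by
          apply List.find?_eq_none.mpr
          intro kv' hmem hhit
          simp only [Bool.and_eq_true, beq_iff_eq] at hhit
          refine hnd.1 ?_
          rw [hk, ← hhit.1]
          exact List.mem_map_of_mem hmem
        rw [hnone, hpv]
        simp [hv]
      · have : ((kv.1 == K) && (kv.2 != "")) = true := by simp [hk, hv]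
        rw [this, hpv]
        simp [hv, hk.symm]
    · have : ((kv.1 == K) && (kv.2 != "")) = false := by simp [hk]
      rw [this]
      have hpv : pvLookup (kv :: rest) K = pvLookup rest K := by
        simp [pvLookup, hk]
      rw [hpv, ih hnd.2]

-- what one slot reads out, per row, as a guarded option
def rowOpt (vuln : List (String × String)) (e : String × Nat × String) : Option String :=
  if pvLookup vuln e.1 ≠ "" then some (e.2.2 ++ ": " ++ pvLookup vuln e.1) else none

theorem fillSlots_eq (vuln : List (String × String))
    (hnd : (vuln.map Prod.fst).Nodup) :
    fillSlots vuln = bTable.map (rowOpt vuln) := by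
  apply List.ext_getElem?
  intro i
  by_cases hi : i < 11
  · have hrow : ∃ K L, bTable[i]? = some (K, i, L) := by
      interval_cases i <;> exact ⟨_, _, rfl⟩
    obtain ⟨K, L, hrow⟩ := hrow
    rw [show fillSlots vuln = vuln.foldl fillStep (List.replicate 11 none) from rfl]
    rw [foldl_fillStep_get vuln _ i (by simp) hi hnd]
    rw [funext (slotHits_pred hrow), find_truthy vuln K hnd]
    have hbang : bTable[i]! = (K, i, L) := by simp [hrow]
    have hmap : (bTable.map (rowOpt vuln))[i]? = some (rowOpt vuln (K, i, L)) := by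
      rw [List.getElem?_map, hrow]; rfl
    rw [hmap, hbang]
    by_cases h : pvLookup vuln K = "" <;> simp [h, rowOpt] <;> (interval_cases i <;> rfl)
  · have h1 : 11 ≤ i := by omega
    rw [List.getElem?_eq_none (by rw [show fillSlots vuln = vuln.foldl fillStep (List.replicate 11 none) from rfl, foldl_fillStep_length]; simpa),
        List.getElem?_eq_none (by simp [bTable]; omega)]

-- A's conditional-append step, pushed to the right of the accumulator
theorem ite_append (c : Prop) [Decidable c] (p : List String) (x : String) :
    (if c then p ++ [x] else p) = p ++ (if c then [x] else []) := by
  split <;> simp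

theorem filterMap_id_ite_cons (c : Prop) [Decidable c] (x : String) (l : List (Option String)) :
    List.filterMap id ((if c then some x else none) :: l) =
      (if c then [x] else []) ++ List.filterMap id l := by
  split <;> simp

-- per record: the slot read-out is A's part list
theorem parts_eq (vuln : List (String × String))
    (hnd : (vuln.map Prod.fst).Nodup) :
    (fillSlots vuln).filterMap id = aParts vuln := by
  rw [fillSlots_eq vuln hnd]
  simp only [bTable, rowOpt, List.map_cons, List.map_nil, filterMap_id_ite_cons,
    List.filterMap_nil]
  simp only [aParts, ite_append]
  simp [show ("漏洞标题" : String) ++ ": " = "漏洞标题: " from by decide,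
    show ("漏洞编号" : String) ++ ": " = "漏洞编号: " from by decide,
    show ("CVE编号" : String) ++ ": " = "CVE编号: " from by decide,
    show ("危险等级" : String) ++ ": " = "危险等级: " from by decide,
    show ("CVSS评分" : String) ++ ": " = "CVSS评分: " from by decide,
    show ("厂商" : String) ++ ": " = "厂商: " from by decide,
    show ("产品" : String) ++ ": " = "产品: " from by decide,
    show ("受影响版本" : String) ++ ": " = "受影响版本: " from by decide,
    show ("漏洞描述" : String) ++ ": " = "漏洞描述: " from by decide,
    show ("解决方案" : String) ++ ": " = "解决方案: " from by decide,
    show ("发布时间" : String) ++ ": " = "发布时间: " from by decide]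

theorem fold_eq (vs : List (List (String × String))) (acc : List String)
    (hnd : ∀ v ∈ vs, (v.map Prod.fst).Nodup) :
    vs.foldl
      (fun texts vuln =>
        let text_parts := aParts vuln
        if ¬ text_parts.isEmpty then texts ++ [PySem.Str.join "\n" text_parts] else texts)
      acc
    = vs.foldl
        (fun texts vuln =>
          let parts := (fillSlots vuln).filterMap id
          if ¬ parts.isEmpty then texts ++ [PySem.Str.join "\n" parts] else texts)
        acc := by
  induction vs generalizing acc with
  | nil => rfl
  | cons v vs ih =>
    simp only [List.foldl_cons]
    rw [parts_eq v (hnd v (by simp))]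
    exact ih _ (fun v' hv' => hnd v' (by simp [hv']))

-- ===== VERDICT (by name: the statement is the Claim_ definition above) =====
theorem generate_knowledge_texts_spec : Claim_equal_generate_knowledge_texts := by
  intro vs _ hpre
  unfold Spec_generate_knowledge_texts generate_knowledge_texts generate_knowledge_texts_alt
  exact fold_eq vs [] hpre
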